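-- pv_equiv track=rewrite | github.com/steffi101/job-agent | scrape_ashby.py | is_senior_title
-- ===== SOURCE A (Python) =====
-- def is_senior_title(title):
--     title_lower = title.lower()
--     senior_indicators = [
--         'senior', 'sr.', 'sr ', 'staff', 'principal', 'lead', 'head of',
--         'director', 'vp', 'vice president', 'chief', 'cto', 'cfo', 'ceo',
--         'architect', 'distinguished', 'fellow', 'executive', 'partner',
--         'iii', 'iv', ' v ', 'level 3', 'level 4', 'level 5',
--         'l3', 'l4', 'l5', 'l6', 'l7',
--     ]
--     for indicator in senior_indicators:
--         if indicator in title_lower: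
--             return True
--     return False
-- ===== SOURCE B (Python) =====
-- SENIOR_INDICATORS = [
--     'senior', 'sr.', 'sr ', 'staff', 'principal', 'lead', 'head of',
--     'director', 'vp', 'vice president', 'chief', 'cto', 'cfo', 'ceo',
--     'architect', 'distinguished', 'fellow', 'executive', 'partner',
--     'iii', 'iv', ' v ', 'level 3', 'level 4', 'level 5',
--     'l3', 'l4', 'l5', 'l6', 'l7',
-- ]
--
-- # set of first characters of the indicators: lets the position scan skip
-- # every position whose character cannot start any indicator
-- FIRST_CHARS = {k[0] for k in SENIOR_INDICATORS}
--
-- def is_senior_title(title):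
--     t = title.lower()
--     for i, c in enumerate(t):
--         if c in FIRST_CHARS and any(t.startswith(k, i) for k in SENIOR_INDICATORS):
--             return True
--     return False
-- ===== Notes on version B (the rewrite author's own statement) =====
-- stated objective: alternative
-- what changed: Keyword-major repeated substring searches ('k in t' per indicator) are replaced by a single position-major scan of the title that consults a precomputed set of indicator first characters and only then tests indicator prefixes at that position.
import Mathlib
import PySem

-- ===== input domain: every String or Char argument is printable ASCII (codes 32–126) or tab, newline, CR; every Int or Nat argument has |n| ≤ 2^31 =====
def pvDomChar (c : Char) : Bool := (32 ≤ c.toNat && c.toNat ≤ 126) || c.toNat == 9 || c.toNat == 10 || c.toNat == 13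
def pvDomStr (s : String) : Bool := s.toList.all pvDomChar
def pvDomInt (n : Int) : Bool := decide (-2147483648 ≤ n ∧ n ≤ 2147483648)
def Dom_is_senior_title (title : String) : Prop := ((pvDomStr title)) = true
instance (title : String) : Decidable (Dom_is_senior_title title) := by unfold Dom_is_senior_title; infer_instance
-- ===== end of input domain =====

-- B replaces A's per-keyword substring searches by one position-major scan with a
-- precomputed first-character set (objective: alternative traversal, same cost class).

-- the shared literal keyword list (identical in Source A and Source B)
def pvIndicators : List String :=
  ["senior", "sr.", "sr ", "staff", "principal", "lead", "head of",
   "director", "vp", "vice president", "chief", "cto", "cfo", "ceo",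
   "architect", "distinguished", "fellow", "executive", "partner",
   "iii", "iv", " v ", "level 3", "level 4", "level 5",
   "l3", "l4", "l5", "l6", "l7"]

-- ===== PORT A =====
-- A's for-loop with early return over the indicator list ('indicator in title_lower')
def goA (t : List Char) : List String → Bool
  | [] => false
  | k :: rest => if PySem.Chars.isIn k.toList t then true else goA t rest

def is_senior_title (title : String) : Bool :=
  goA (PySem.Chars.lower title.toList) pvIndicators

-- ===== PORT B =====
-- FIRST_CHARS = {k[0] for k in SENIOR_INDICATORS}
def pvFirstChars : PySem.Set Char :=
  PySem.Set.ofList (pvIndicators.filterMap (fun k => PySem.Str.pyGet? k 0))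

-- 'for i, c in enumerate(t): if c in FIRST_CHARS and any(t.startswith(k, i) ...)'
-- t.startswith(k, i) is ported as startswith on t.drop i: exact for the 0 ≤ i ≤ len(t)
-- indices enumerate produces (no PySem primitive takes a start offset)
def goB (t : List Char) : List (Int × Char) → Bool
  | [] => false
  | (i, c) :: rest =>
    if PySem.Set.contains pvFirstChars c &&
       pvIndicators.any (fun k => PySem.Chars.startswith (t.drop i.toNat) k.toList)
    then true
    else goB t rest

def is_senior_title_alt (title : String) : Bool :=
  let t := PySem.Chars.lower title.toList
  goB t (PySem.List.enumerate t 0)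

-- ===== PRECONDITION & SPEC =====
def Spec_is_senior_title (title : String) (out : Bool) : Prop := out = is_senior_title_alt title
instance (title : String) (out : Bool) : Decidable (Spec_is_senior_title title out) := by unfold Spec_is_senior_title; infer_instance

-- ===== CLAIM (what is proved, stated in full; the proofs are below) =====
def Claim_equal_is_senior_title : Prop := ∀ (title : String), Dom_is_senior_title title → Spec_is_senior_title title (is_senior_title title)

-- ===== LEMMAS AND PROOFS =====

-- every indicator is nonempty
set_option maxRecDepth 100000 in
theorem pvKw_ne_nil : ∀ k ∈ pvIndicators, k.toList ≠ [] := by decide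

-- the first character of every indicator is in FIRST_CHARS
set_option maxRecDepth 100000 in
theorem pvKw_head_mem' : ∀ k ∈ pvIndicators,
    PySem.Set.contains pvFirstChars (k.toList.headD ' ') = true := by decide

theorem pvKw_head_mem : ∀ k ∈ pvIndicators, ∀ c : Char,
    k.toList.head? = some c → PySem.Set.contains pvFirstChars c = true := by
  intro k hk c hc
  have := pvKw_head_mem' k hk
  rwa [List.headD_eq_head?_getD, hc] at this

theorem goA_iff (t : List Char) (ks : List String) :
    goA t ks = true ↔ ∃ k ∈ ks, k.toList <:+: t := by
  induction ks with
  | nil => simp [goA]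
  | cons k rest ih =>
    simp only [goA]
    split_ifs with h
    · exact iff_of_true rfl ⟨k, List.mem_cons_self, (PySem.Chars.isIn_iff_infix _ _).mp h⟩
    · rw [ih]
      constructor
      · rintro ⟨k', hk', hinf⟩; exact ⟨k', List.mem_cons_of_mem _ hk', hinf⟩
      · rintro ⟨k', hk', hinf⟩
        rcases List.mem_cons.mp hk' with rfl | hk'
        · exact absurd ((PySem.Chars.isIn_iff_infix _ _).mpr hinf) (by simp [h])
        · exact ⟨k', hk', hinf⟩

theorem goB_iff (t l : List Char) (j : Nat) (hdrop : t.drop j = l) :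
    goB t (PySem.List.enumerate l (j : Int)) = true ↔
      ∃ i : Nat, j ≤ i ∧ ∃ k ∈ pvIndicators, k.toList <+: t.drop i := by
  induction l generalizing j with
  | nil =>
    simp only [PySem.List.enumerate_nil, goB]
    constructor
    · intro h; exact absurd h (by simp)
    · rintro ⟨i, hji, k, hk, hpre⟩
      have hnil : t.drop i = [] :=
        List.drop_eq_nil_iff.mpr (le_trans (List.drop_eq_nil_iff.mp hdrop) hji)
      rw [hnil] at hpre
      exact absurd (List.prefix_nil.mp hpre) (pvKw_ne_nil k hk)
  | cons c l' ih =>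
    rw [PySem.List.enumerate_cons]
    simp only [goB]
    rw [show ((j:Int)).toNat = j from Int.toNat_natCast j, hdrop]
    split_ifs with hcond
    · refine iff_of_true rfl ?_
      have hany : pvIndicators.any
          (fun k => PySem.Chars.startswith (c :: l') k.toList) = true := by
        cases hfc : PySem.Set.contains pvFirstChars c <;> simp at hcond <;> simp [hcond]
      obtain ⟨k, hk, hsw⟩ := List.any_eq_true.mp hany
      refine ⟨j, le_refl j, k, hk, ?_⟩
      rw [hdrop]
      exact (PySem.Chars.startswith_iff _ _).mp hsw
    · have hstep : ((j : Int) + 1) = ((j + 1 : Nat) : Int) := by push_cast; ring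
      have hd' : t.drop (j + 1) = l' := by
        have := congrArg List.tail hdrop
        simpa [List.tail_drop] using this
      rw [hstep, ih (j + 1) hd']
      constructor
      · rintro ⟨i, hji, hrest⟩; exact ⟨i, le_trans (Nat.le_succ j) hji, hrest⟩
      · rintro ⟨i, hji, k, hk, hpre⟩
        by_cases hij : j + 1 ≤ i
        · exact ⟨i, hij, k, hk, hpre⟩
        · have : i = j := by omega
          subst this
          exfalso
          apply hcond
          rw [hdrop] at hpre
          obtain ⟨c0, k', hk0⟩ := List.exists_cons_of_ne_nil (pvKw_ne_nil k hk)
          have hhead : c0 = c := by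
            rw [hk0] at hpre
            obtain ⟨r, hr⟩ := hpre
            simpa using congrArg List.head? hr
          have h1 : PySem.Set.contains pvFirstChars c = true :=
            pvKw_head_mem k hk c (by rw [hk0, hhead]; rfl)
          have h2 : pvIndicators.any
              (fun k => PySem.Chars.startswith (c :: l') k.toList) = true :=
            List.any_eq_true.mpr ⟨k, hk, (PySem.Chars.startswith_iff _ _).mpr hpre⟩
          simp only [h1, h2, Bool.and_self]

theorem main_eq (title : String) : is_senior_title title = is_senior_title_alt title := by
  unfold is_senior_title is_senior_title_alt
  set t := PySem.Chars.lower title.toList with ht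
  have hB := goB_iff t t 0 (by simp)
  have hA := goA_iff t pvIndicators
  rw [show ((0 : Nat) : Int) = (0 : Int) from rfl] at hB
  apply Bool.coe_iff_coe.mp
  rw [hA, hB]
  constructor
  · rintro ⟨k, hk, pre, post, heq⟩
    refine ⟨pre.length, Nat.zero_le _, k, hk, post, ?_⟩
    rw [← heq, List.append_assoc, List.drop_left]
  · rintro ⟨i, _, k, hk, hpre⟩
    exact ⟨k, hk, hpre.isInfix.trans (t.drop_suffix i).isInfix⟩

-- ===== VERDICT (by name: the statement is the Claim_ definition above) =====
theorem is_senior_title_spec : Claim_equal_is_senior_title := by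
  intro title _
  unfold Spec_is_senior_title
  exact main_eq title
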